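/-
  THE SEGMENTS OF `DGifDecompressLine` (dgif_lib.c:860-1003; 362 instructions at 106AE0H; a PROTECTED frame: the `int CrntCode`):
  THE LZW DECODER. The assertions at its cut points, the segment claims `SegP`, `Seg1` … `Seg15`, `SegE`, and THE COMPOSITION
  (segments ⇒ the function's contract `DGifDecompressLine.spec`, Gif/Spec/Lzw.lean), proved here. Design: design/CONTRACTS.md
  entry 7 (the segments DL.0 … DL.X), design/INVARIANTS.md §3.2 (THE ACCESS TABLE), §6 (the measures). Template: Gif/Spec/ReaderSegs.lean.

  WHERE gcc -Og PUT THE C LOCALS (`rsp` = the stack pointer of the body = RA − 200, RA = the entry's `rsp`):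
      [rsp+08H]  RA−192  8   Stack  = pv + 344                 (l.871; constant)
      [rsp+10H]  RA−184  4   ClearCode                         (l.873; constant)
      [rsp+14H]  RA−180  4   LastCode                          (l.874, 908, 995; ANY 32-bit value: no clause anywhere; reused as a
                                                                temporary for the result of DGifGetPrefixChar at 106F53H)
      [rsp+18H]  RA−176  8   Suffix = pv + 4439                (l.870; constant)
      [rsp+20H]  RA−168  8   GifFile                           (the argument; constant)
      [rsp+28H]  RA−160  4   LineLen = n                       (the argument; constant)
      [rsp+2CH]  RA−156  4   EOFCode                           (l.872; constant)
      [rsp+30H]  RA−152  8   Line                              (the argument; constant)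
      [rsp+38H]  RA−144  8/4 SPILL: `Private` (8 bytes) inside the two pop loops; `i` (4 bytes) inside the trace loop
      [rsp+40H]  RA−136  8   SPILL: `Prefix` inside the two pop loops; `Private` inside the trace loop
      [rsp+48H]  RA−128  8   the shadow index of the frame, `(RA − 120) >> 3` (in r15 only during the prologue, the loads and the epilogue)
      [rsp+50H]  RA−120  64  THE PROTECTED FRAME; its object `CrntCode` at [rsp+70H] = RA − 88 (4 bytes)
      RA−48 … RA−8       the saved rbx rbp r12 r13 r14 r15 (pushed in the order r15 r14 r13 r12 rbp rbx)
  REGISTERS in the main loop (head 106F7DH, and every cut of the body outside the pop loops and the trace loop):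
      ebx = StackPtr (the LOCAL: `pv.StackPtr` keeps its entry value until l.1000), ebp = i, r14 = Private = pv, r13 = Prefix = pv + 8536,
      r12 r15 scratch (r12d = CrntCode / CrntPrefix where said).
  In the two pop loops (heads 106BE3H l.883, 106F12H l.970): ebx = StackPtr, ebp = i, r15 = Line, r14d = LineLen; r12 r13 scratch.
  In the trace loop (head 106E4BH l.955): ebx = StackPtr, r12d = CrntPrefix, r15d = ClearCode, r13 = Prefix; rbp r14 scratch.
  Every one of these 32-bit locals was written by a 32-bit `mov` / `lea` / `sub`: the upper halves of the registers are 0, and the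
  assertions speak of the whole register (`(v.reg .rbx).toNat ≤ 4095`).

  THE CUTS (17 segments; `m` = the measure `mu` at the head of the present round of the main loop; `k` = `4095 − StackPtr`):
      SegP   106AE0H … 106B3DH   19  the prologue                                                      → Entered
      Seg1   106B3DH … 106BE3H   37  DL.0  l.866-880: Private, the seven loads, l.876, l.880           → Pop 106BE3H | Head | Done (l.877)
      Seg2   106BE3H … 106C3FH   29  DL.0  l.883-885: THE FIRST POP LOOP (inside: measure StackPtr)    → Head
      Seg3   106F7DH … 106FA0H   16  DL.H / DL.X  l.888-891 DGifDecompressInput; l.999-1002            → Decoded | Done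
      Seg4   106FA0H … 106FEAH   25  DL.D  l.893-917: EOF code, clear code, pixel (`Line[i++]`), code   → Done | Mid 106CFBH | Traced | Upd 106FEAH
      Seg5   106CFBH, 106C63H…   10  DL.C  l.902-904: `Prefix[0 … 4095] = NO_SUCH_CODE` (loop inside)   → Mid 106C87H
      Seg6   106C87H … 106CFBH   26  DL.C  l.905-908: RunningCode, RunningBits, MaxCode1, LastCode     → Head (smaller measure)
      Seg7   106D06H … 106D47H   16  DL.T  l.923-933: `Prefix[CrntCode]`, the test of l.932            → Trace 106E4BH | Mid 106DA7H | Mid 106D47H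
      Seg8   106DA7H … 106E05H   24  DL.T′ l.934-938 (CrntCode = RunningCode − 2)                       → Trace 106E4BH
      Seg9   106D47H … 106DA7H   24  DL.T′ l.940-944 (the undefined code accepted: F-4)                → Trace 106E4BH
      Seg10  106E4BH, 106E05H…   26  DL.R  l.955-960: ONE ROUND of the trace loop                       → Trace 106E4BH (smaller k) | Trace 106E67H
      Seg11  106E67H … 106EDEH   28  DL.G  l.961-967: the defect test, the last push                   → Done | Pop 106F12H
      Seg12  106EDEH … 106F43H   28  DL.G  l.970-972: THE SECOND POP LOOP (inside: measure StackPtr)   → Upd 106FEAH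
      Seg13  106FEAH … 107045H   22  DL.U  l.974-979: the three tests, `Prefix[RunningCode − 2] =`      → Head | UpdRC 106F43H | UpdRC 107045H
      Seg14  106F43H … 106F7DH   14  DL.U′ l.986-988, l.995                                             → Head (smaller measure)
      Seg15  107045H … 107071H   13  DL.U′ l.990-992, l.995                                             → Head (smaller measure)
      SegE   10709DH … ret         9  the epilogue                                                      → Returned
  The two instructions of l.995 (106F75H, 106F79H: `LastCode = CrntCode`) are walked by Seg13, Seg14 and Seg15 (no cut there).

  THE MEASURES. Main loop: `mu R mem pv` (8·rem + 8·Buf[0] + CrntShiftState): a successful DGifDecompressInput lowers it by at least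
  1 (Seg3); no other segment of the body raises it: they store only into `Stack`, `Suffix`, `Prefix`, RunningCode, RunningBits,
  MaxCode1, LastCode, `Line`, their own stack (`mu_sameExcept` of Gif/Spec/Carry.lean; `Body.carry` of Gif/Spec/LzwCarry.lean carries
  it with `Body` and `Locals` through a segment's stores). Trace loop: `k = 4095 − StackPtr`. The pop loops and the clear loop stay
  inside their segments.

  `Line` AND THE PRIVATE OBJECT. `BufOK.loose` alone admits a `Line` inside the body of pv, where `Line[i] = …` would overwrite
  RunningCode or `Buf[0]`; the contract's precondition excludes it, and `Body.apart` states it once (`n = 0`, or `Line[0 … n)` does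
  not meet `[pv, pv + 24936)`): every store to `Line[i]` keeps `LZOK` and the measure by it (`SegP` takes it from `pre`).

  THE RETURN ADDRESS. `Body.slot_ra`: the slot `[RA, RA + 8)` still holds `ret` at every cut (no store of the function or of a
  callee goes there: the stack stores are below `RA`, `Line` and the cursor above `RA + 8`, gif and pv on the heap): the `ret` of
  Segment E (1070B9H) needs it.
-/
import Gif.Spec.Lzw
import Gif.LabelsAt
namespace Gif.Spec
open X86 X86.User Asan ProgX.Base ProgX.Base.Spec

namespace DGifDecompressLine

/-! ### The assertions -/

/-- The active frames inside the body: the function's own protected frame (`base = RA − 120`), innermost. -/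
abbrev framesIn (frames : List (Nat × FrameLayout)) (e : State) : List (Nat × FrameLayout) :=
  ((e.reg .rsp).toNat - 120, Gif.Frames.DGifDecompressLine) :: frames

/-- **IN THE BODY of `DGifDecompressLine`** (what holds at EVERY cut from 106B3DH to 10709DH), at the address `cut`, inside the
call that was entered at the state `e` (return address `ret`) with the function's precondition; `n` = `LineLen`. The prologue is
done: six registers saved, `rsp = RA − 200`, the three arguments in their slots, the frame's red zones poisoned: the heap's
invariant holds with the OWN frame pushed. The state invariant and THE LZW FIELD RANGES hold of the present memory (the local
StackPtr / LastCode are written back only at l.999-1000; every store of the body keeps or re-establishes `LZOK`). Nothing was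
written but the function's stack, the frame's 8 shadow bytes and the contract's windows; the reader did not go back. -/
structure Body (cut : Word) (H : Heap) (rest : List Obj) (frames : List (Nat × FrameLayout)) (F : Forest) (R : Rd) (n : Nat)
    (u₀ e : State) (ret : Word) (v : State) : Prop where
  /-- the function was entered at `e` … -/
  entry : AtEntry (conv u₀) Gif.L.DGifDecompressLine.entry (DGifDecompressLine.spec H rest frames F R n).frame ret e
  /-- … with its precondition -/
  pre : (DGifDecompressLine.spec H rest frames F R n).pre e
  /-- `Line[0 … n)` does not meet the private object (from `pre`): the stores `Line[i] =` (106C27H, 106F0BH, 106FE3H) keep `LZOK`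
  and the measure -/
  apart : n = 0 ∨ (e.reg .rsi).toNat + n ≤ F.pv ∨ F.pv + 24936 ≤ (e.reg .rsi).toNat
  rip : v.rip = cut
  /-- six pushes and `sub rsp, 98H` -/
  rsp : v.reg .rsp = e.reg .rsp - 200
  /-- the saved registers, in push order: the six pops 1070AFH … 1070B7H restore them -/
  slot_r15 : v.mem.readLE (e.reg .rsp - 8) 8 = (e.reg .r15).toNat
  slot_r14 : v.mem.readLE (e.reg .rsp - 16) 8 = (e.reg .r14).toNat
  slot_r13 : v.mem.readLE (e.reg .rsp - 24) 8 = (e.reg .r13).toNat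
  slot_r12 : v.mem.readLE (e.reg .rsp - 32) 8 = (e.reg .r12).toNat
  slot_rbp : v.mem.readLE (e.reg .rsp - 40) 8 = (e.reg .rbp).toNat
  slot_rbx : v.mem.readLE (e.reg .rsp - 48) 8 = (e.reg .rbx).toNat
  /-- the return-address slot `[RA, RA + 8)` still holds `ret`: the `ret` at 1070B9H pops it -/
  slot_ra : UInt64.ofNat (v.mem.readLE (e.reg .rsp) 8) = ret
  /-- `[rsp+20H]` = GifFile (106AF4H) -/
  s_gif : v.mem.readLE (e.reg .rsp - 168) 8 = F.gif
  /-- `[rsp+28H]` = LineLen, 4 bytes (106AFEH) -/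
  s_len : v.mem.readLE (e.reg .rsp - 160) 4 = n
  /-- `[rsp+30H]` = Line (106AF9H) -/
  s_line : v.mem.readLE (e.reg .rsp - 152) 8 = (e.reg .rsi).toNat
  /-- the heap's invariant, the own frame active, the clean stack ending at the body's stack pointer -/
  inv : HeapInv H rest (framesIn frames e) ((e.reg .rsp).toNat - 200) v.mem
  ok : GifOK H F R v.mem
  /-- [LZ1-LZ6] of the present memory -/
  lz : LZOK v.mem F.pv
  rem : rem R v.mem ≤ rem R e.mem
  /-- the function's stack, the own frame's shadow, the contract's windows (`writes e`) -/
  same : Mem.SameExcept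
    [⟨(e.reg .rsp).toNat - 560, (e.reg .rsp).toNat⟩,
     shadowSpan ((e.reg .rsp).toNat - 120) ((e.reg .rsp).toNat - 56),
     ⟨(e.reg .rsi).toNat, (e.reg .rsi).toNat + n⟩,
     ⟨F.pv + 20, F.pv + 56⟩,
     ⟨F.pv + 88, F.pv + 344⟩,
     ⟨F.pv + 344, F.pv + 4439⟩,
     ⟨F.pv + 4439, F.pv + 8535⟩,
     ⟨F.pv + 8536, F.pv + 24920⟩,
     ⟨F.gif + 96, F.gif + 100⟩,
     ⟨R.cur, R.cur + 8⟩] e.mem v.mem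
  code : (conv u₀).code.In v.mem
  abi : (conv u₀).inv v

/-- **THE CONSTANT LOCALS IN THEIR SPILL SLOTS** (stored by Seg1, l.870-873 and 106BBBH / 106BD4H; never stored again): the two
table pointers, `ClearCode` and `EOFCode` AS THE PRIVATE OBJECT HOLDS THEM NOW (no store of the function or of its callees goes to
`[pv + 8, pv + 20)`; with `LZOK`: `ClearCode ≤ 256`, so the 32-bit value is not negative: the third argument of DGifGetPrefixChar,
and `CrntPrefix > ClearCode` makes `CrntPrefix ≥ 1`), and the frame's shadow index. -/
structure Locals (F : Forest) (e v : State) : Prop where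
  /-- `[rsp+08H]` = Stack = `&pv.Stack[0]` -/
  s_stack : v.mem.readLE (e.reg .rsp - 192) 8 = F.pv + 344
  /-- `[rsp+10H]` = ClearCode, 4 bytes -/
  s_clear : v.mem.readLE (e.reg .rsp - 184) 4 = GifFilePrivateType.ClearCode v.mem F.pv
  /-- `[rsp+18H]` = Suffix = `&pv.Suffix[0]` -/
  s_suffix : v.mem.readLE (e.reg .rsp - 176) 8 = F.pv + 4439
  /-- `[rsp+2CH]` = EOFCode, 4 bytes -/
  s_eof : v.mem.readLE (e.reg .rsp - 156) 4 = GifFilePrivateType.EOFCode v.mem F.pv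
  /-- `[rsp+48H]` = the shadow index of the frame (what the epilogue's store needs in r15) -/
  s_shadow : v.mem.readLE (e.reg .rsp - 128) 8 = ((e.reg .rsp - 120) >>> 3).toNat

/-- **AFTER THE PROLOGUE** (106B3DH, before `lea rdi, [rdi+70H]`): `Body`; `rdi` is still the argument, `rbx` its copy, `r15` the
shadow index. No spill slot but the three arguments' is written yet. -/
structure Entered (H : Heap) (rest : List Obj) (frames : List (Nat × FrameLayout)) (F : Forest) (R : Rd) (n : Nat)
    (u₀ e : State) (ret : Word) (v : State) : Prop where
  body : Body Gif.L.DGifDecompressLine.at_106b3d H rest frames F R n u₀ e ret v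
  rdi : v.reg .rdi = e.reg .rdi
  rbx : v.reg .rbx = e.reg .rdi
  r15 : v.reg .r15 = (e.reg .rsp - 120) >>> 3

/-- **BEFORE THE EPILOGUE** (10709DH; reached from l.877, l.890, l.899, l.964 with `eax = 0` and from l.1002 with `eax = 1`):
`Body` — its `ok`, `lz`, `rem` ARE the contract's postcondition, stated of the memory before the shadow is cleared —, the shadow
index back in `r15`, the result in `eax`. -/
structure Done (H : Heap) (rest : List Obj) (frames : List (Nat × FrameLayout)) (F : Forest) (R : Rd) (n : Nat)
    (u₀ e : State) (ret : Word) (v : State) : Prop where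
  body : Body Gif.L.DGifDecompressLine.at_10709d H rest frames F R n u₀ e ret v
  r15 : v.reg .r15 = (e.reg .rsp - 120) >>> 3
  res : IsBool v

/-- **THE REGISTER ALLOCATION OF THE MAIN LOOP** at the address `cut` (the head 106F7DH, and the cuts of the body outside the pop
loops and the trace loop): `Body`, `Locals`, and
  `r14 = Private`, `r13 = Prefix`;
  `ebx` = the local StackPtr, A FILL LEVEL OF `Stack[4095]`; `ebp = i`, `0 ≤ i ≤ LineLen`;
  **W1**: `i < LineLen → StackPtr = 0` (a pop loop ends with `StackPtr = 0 ∨ i ≥ LineLen`; the other arms do not touch StackPtr). -/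
structure Main (cut : Word) (H : Heap) (rest : List Obj) (frames : List (Nat × FrameLayout)) (F : Forest) (R : Rd) (n : Nat)
    (u₀ e : State) (ret : Word) (v : State) : Prop where
  body : Body cut H rest frames F R n u₀ e ret v
  locals : Locals F e v
  r14 : (v.reg .r14).toNat = F.pv
  r13 : (v.reg .r13).toNat = F.pv + 8536
  /-- the local StackPtr -/
  rbx : (v.reg .rbx).toNat ≤ 4095
  /-- `i` -/
  rbp : (v.reg .rbp).toNat ≤ n
  w1 : (v.reg .rbp).toNat < n → (v.reg .rbx).toNat = 0

/-- **THE HEAD OF THE MAIN LOOP** (106F7DH, l.888): `Main`, and THE MEASURE `mu = m`. -/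
structure Head (m : Nat) (H : Heap) (rest : List Obj) (frames : List (Nat × FrameLayout)) (F : Forest) (R : Rd) (n : Nat)
    (u₀ e : State) (ret : Word) (v : State) : Prop where
  main : Main Gif.L.DGifDecompressLine.at_106f7d H rest frames F R n u₀ e ret v
  mu : mu R v.mem F.pv = m

/-- **IN THE ROUND WHOSE HEAD HAD THE MEASURE `m`, BEHIND THE ARMS** (106FEAH l.974: from the pixel arm and from the second pop
loop): `Main` (W1 again), and the measure is below `m`. -/
structure Upd (cut : Word) (m : Nat) (H : Heap) (rest : List Obj) (frames : List (Nat × FrameLayout)) (F : Forest) (R : Rd)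
    (n : Nat) (u₀ e : State) (ret : Word) (v : State) : Prop where
  main : Main cut H rest frames F R n u₀ e ret v
  mu : mu R v.mem F.pv < m

/-- **BEFORE ONE OF THE TWO CALLS OF DGifGetPrefixChar OF l.987 / l.991** (106F43H / 107045H): `Upd`, and `r15d` = RunningCode as
loaded at 107031H, callee-saved across the call: `Suffix[RunningCode − 2]` (l.986, 990) is an element of `Suffix[4096]`.
(`esi` = CrntCode at 107045H: ANY value, DGifGetPrefixChar is total.) -/
structure UpdRC (cut : Word) (m : Nat) (H : Heap) (rest : List Obj) (frames : List (Nat × FrameLayout)) (F : Forest) (R : Rd)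
    (n : Nat) (u₀ e : State) (ret : Word) (v : State) : Prop where
  upd : Upd cut m H rest frames F R n u₀ e ret v
  rc_lo : 2 ≤ (v.reg .r15).toNat
  rc_hi : (v.reg .r15).toNat ≤ 4097

/-- **IN THE ROUND, BEFORE THE STACK IS USED** (106CFBH, 106C87H: the clear arm; 106D47H, 106DA7H: the two arms of l.932; and inside
`Decoded`, `Traced`): `Main` with `i < LineLen` (the test of l.888, `i` unchanged since) and so `StackPtr = 0`; the measure is below
`m`. (`r12d` = CrntCode at 106D47H: ANY value, it is only handed to DGifGetPrefixChar.) -/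
structure Mid (cut : Word) (m : Nat) (H : Heap) (rest : List Obj) (frames : List (Nat × FrameLayout)) (F : Forest) (R : Rd)
    (n : Nat) (u₀ e : State) (ret : Word) (v : State) : Prop where
  main : Main cut H rest frames F R n u₀ e ret v
  lt : (v.reg .rbp).toNat < n
  sp0 : (v.reg .rbx).toNat = 0
  mu : mu R v.mem F.pv < m

/-- **AFTER A SUCCESSFUL DGifDecompressInput** (106FA0H, l.893): `Mid`, and the frame's object `CrntCode` (`[rsp+70H]`) is a
12-bit code. -/
structure Decoded (m : Nat) (H : Heap) (rest : List Obj) (frames : List (Nat × FrameLayout)) (F : Forest) (R : Rd) (n : Nat)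
    (u₀ e : State) (ret : Word) (v : State) : Prop where
  mid : Mid Gif.L.DGifDecompressLine.at_106fa0 m H rest frames F R n u₀ e ret v
  code : rd v.mem ((e.reg .rsp).toNat - 88) 4 ≤ 4095

/-- **BEFORE `Prefix[CrntCode]`** (106D06H, l.923): `Mid`, and `r12d` = CrntCode, an index of `Prefix[4096]`. -/
structure Traced (m : Nat) (H : Heap) (rest : List Obj) (frames : List (Nat × FrameLayout)) (F : Forest) (R : Rd) (n : Nat)
    (u₀ e : State) (ret : Word) (v : State) : Prop where
  mid : Mid Gif.L.DGifDecompressLine.at_106d06 m H rest frames F R n u₀ e ret v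
  r12 : (v.reg .r12).toNat ≤ 4095

/-- **THE TRACE LOOP** (l.955-960), at its head 106E4BH and behind it (106E67H, l.961): `Body`, `Locals`,
  `r13 = Prefix`; `r15d = ClearCode`; `ebx` = StackPtr with `StackPtr + k = 4095` (so `StackPtr ≤ 4095`; `k` IS THE MEASURE);
  `r12d` = CrntPrefix: ANY 32-bit value (no clause: the loop test, then l.961, bound it before it is an index; the assertion does
  not depend on which arm of l.932-946 was taken);
  `i` in `[rsp+38H]` (4 bytes), `i < LineLen`; `Private` in `[rsp+40H]`; rbp, r14 scratch;
  the measure of the main loop is below `m`. -/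
structure Trace (cut : Word) (m k : Nat) (H : Heap) (rest : List Obj) (frames : List (Nat × FrameLayout)) (F : Forest) (R : Rd)
    (n : Nat) (u₀ e : State) (ret : Word) (v : State) : Prop where
  body : Body cut H rest frames F R n u₀ e ret v
  locals : Locals F e v
  r13 : (v.reg .r13).toNat = F.pv + 8536
  r15 : (v.reg .r15).toNat = GifFilePrivateType.ClearCode v.mem F.pv
  /-- the local StackPtr: `Stack[StackPtr++] =` needs `k ≥ 1` (index ≤ 4094), which the tests of l.955 / l.961 give -/
  rbx : (v.reg .rbx).toNat + k = 4095
  s_i : v.mem.readLE (e.reg .rsp - 144) 4 < n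
  s_pv : v.mem.readLE (e.reg .rsp - 136) 8 = F.pv
  mu : mu R v.mem F.pv < m

/-- **THE HEAD OF A POP LOOP** (106BE3H l.883; 106F12H l.970): `Body`, `Locals`,
  `ebx` = StackPtr `≤ 4095` (`Stack[--StackPtr]` after the test `StackPtr ≠ 0`: index in `[0, 4094]`); `ebp = i ≤ LineLen`
  (`Line[i++] =` after the test `i < LineLen`); `r14d = LineLen`; `r15 = Line`; `Private` in `[rsp+38H]`, `Prefix` in `[rsp+40H]`;
  the measure of the main loop is below `m` (at 106BE3H, before the main loop: any `m` above it). -/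
structure Pop (cut : Word) (m : Nat) (H : Heap) (rest : List Obj) (frames : List (Nat × FrameLayout)) (F : Forest) (R : Rd)
    (n : Nat) (u₀ e : State) (ret : Word) (v : State) : Prop where
  body : Body cut H rest frames F R n u₀ e ret v
  locals : Locals F e v
  rbx : (v.reg .rbx).toNat ≤ 4095
  rbp : (v.reg .rbp).toNat ≤ n
  r14 : (v.reg .r14).toNat = n
  r15 : v.reg .r15 = e.reg .rsi
  s_pv : v.mem.readLE (e.reg .rsp - 144) 8 = F.pv
  s_prefix : v.mem.readLE (e.reg .rsp - 136) 8 = F.pv + 8536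
  mu : mu R v.mem F.pv < m

/-! ### The segment claims -/

/-- **Segment P** (the prologue, 106AE0H … 106B3DH, 19 instructions): six pushes, `sub rsp, 98H`, `rbx = rdi`, the three arguments
to `[rsp+20H]`, `[rsp+30H]`, `[rsp+28H]`, the frame's three header words, the shadow index (`r15`), the two poison stores. -/
def SegP (Lay : Layout) (μ : Microarch) (u₀ : State) : Prop :=
  ∀ (H : Heap) (rest : List Obj) (frames : List (Nat × FrameLayout)) (F : Forest) (R : Rd) (n : Nat) (e : State) (ret : Word),
    AtEntry (conv u₀) Gif.L.DGifDecompressLine.entry (DGifDecompressLine.spec H rest frames F R n).frame ret e →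
    (DGifDecompressLine.spec H rest frames F R n).pre e →
    ReachVia Lay μ WayInv e (Entered H rest frames F R n u₀ e ret)

/-- **Segment 1** (DL.0, l.866-880; 106B3DH … 106BE3H and 107098H; 37 instructions): `Private = GifFile->Private` (checked load of
8 bytes), StackPtr, the two table pointers, EOFCode, ClearCode, LastCode (four checked loads of pv's fields) into their slots;
l.876 `StackPtr > 4095`: `eax = 0`, to the epilogue (cannot fire by [LZ5]; walked or refuted); l.880 `StackPtr = 0`: `i = 0`,
straight to the head of the main loop; otherwise `i = 0`, Private / Prefix / the shadow index spilled, `r15 = Line`,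
`r14d = LineLen`: the head of the first pop loop. -/
def Seg1 (Lay : Layout) (μ : Microarch) (u₀ : State) : Prop :=
  ∀ (H : Heap) (rest : List Obj) (frames : List (Nat × FrameLayout)) (F : Forest) (R : Rd) (n : Nat) (e : State) (ret : Word)
    (v : State),
    Entered H rest frames F R n u₀ e ret v →
    ReachVia Lay μ WayInv v (fun w =>
      (∃ m, Pop Gif.L.DGifDecompressLine.at_106be3 m H rest frames F R n u₀ e ret w) ∨
      (∃ m, Head m H rest frames F R n u₀ e ret w) ∨
      Done H rest frames F R n u₀ e ret w)

/-- **Segment 2** (DL.0, l.883-885; 106BE3H … 106C3FH and 107071H … 107080H; 29 instructions): THE FIRST POP LOOP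
`while (StackPtr != 0 && i < LineLen) Line[i++] = Stack[--StackPtr]` (one checked load of `Stack[StackPtr − 1]`, one checked store
of `Line[i]` per round; measure: StackPtr), then `r14`, `r13` restored from their spill slots: the head of the main loop, W1. -/
def Seg2 (Lay : Layout) (μ : Microarch) (u₀ : State) : Prop :=
  ∀ (H : Heap) (rest : List Obj) (frames : List (Nat × FrameLayout)) (F : Forest) (R : Rd) (n m : Nat) (e : State) (ret : Word)
    (v : State),
    Pop Gif.L.DGifDecompressLine.at_106be3 m H rest frames F R n u₀ e ret v →
    ReachVia Lay μ WayInv v (fun w => ∃ m', Head m' H rest frames F R n u₀ e ret w)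

/-- **Segment 3** (DL.H and DL.X, l.888-891 and l.999-1002; 106F7DH … 106FA0H, 107080H … 107098H, 1070BAH … 1070C1H; 16
instructions): `i ≥ LineLen`: `Private->LastCode = LastCode; Private->StackPtr = StackPtr` ([LZ5] by `StackPtr ≤ 4095`), `eax = 1`,
to the epilogue. Otherwise `DGifDecompressInput(GifFile, &CrntCode)` (the frame's object); GIF_ERROR: `eax = 0`, to the
epilogue; GIF_OK: `CrntCode ≤ 4095` and THE MEASURE WENT DOWN. -/
def Seg3 (Lay : Layout) (μ : Microarch) (u₀ : State) : Prop :=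
  ∀ (H : Heap) (rest : List Obj) (frames : List (Nat × FrameLayout)) (F : Forest) (R : Rd) (n m : Nat) (e : State) (ret : Word)
    (v : State),
    Head m H rest frames F R n u₀ e ret v →
    ReachVia Lay μ WayInv v (fun w =>
      Decoded m H rest frames F R n u₀ e ret w ∨
      Done H rest frames F R n u₀ e ret w)

/-- **Segment 4** (DL.D, l.893-917; 106FA0H … 106FEAH and 106C3FH … 106C63H; 25 instructions): `CrntCode == EOFCode`: the checked
store of `GifFile->Error`, `eax = 0`, to the epilogue; `== ClearCode`: the clear arm; `≥ ClearCode`: the trace arm with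
`r12d = CrntCode ≤ 4095`; else the checked store `Line[i++] = CrntCode` (`i < LineLen`): behind the arms, `StackPtr = 0` still. -/
def Seg4 (Lay : Layout) (μ : Microarch) (u₀ : State) : Prop :=
  ∀ (H : Heap) (rest : List Obj) (frames : List (Nat × FrameLayout)) (F : Forest) (R : Rd) (n m : Nat) (e : State) (ret : Word)
    (v : State),
    Decoded m H rest frames F R n u₀ e ret v →
    ReachVia Lay μ WayInv v (fun w =>
      Done H rest frames F R n u₀ e ret w ∨
      Mid Gif.L.DGifDecompressLine.at_106cfb m H rest frames F R n u₀ e ret w ∨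
      Traced m H rest frames F R n u₀ e ret w ∨
      Upd Gif.L.DGifDecompressLine.at_106fea m H rest frames F R n u₀ e ret w)

/-- **Segment 5** (DL.C, l.902-904; 106CFBH … 106D06H and 106C63H … 106C87H; 10 instructions, 4096 rounds): `j = 0`, then
`Prefix[j] = NO_SUCH_CODE` (a checked store of 4 bytes at `r13 + 4·j`, `j ≤ 4095`: inside `Prefix[4096]`; measure `4096 − j`). -/
def Seg5 (Lay : Layout) (μ : Microarch) (u₀ : State) : Prop :=
  ∀ (H : Heap) (rest : List Obj) (frames : List (Nat × FrameLayout)) (F : Forest) (R : Rd) (n m : Nat) (e : State) (ret : Word)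
    (v : State),
    Mid Gif.L.DGifDecompressLine.at_106cfb m H rest frames F R n u₀ e ret v →
    ReachVia Lay μ WayInv v (Mid Gif.L.DGifDecompressLine.at_106c87 m H rest frames F R n u₀ e ret)

/-- **Segment 6** (DL.C, l.905-908; 106C87H … 106CFBH; 26 instructions): `RunningCode = EOFCode + 1` (= ClearCode + 2: [LZ3]),
`RunningBits = BitsPerPixel + 1` ([LZ4]), `MaxCode1 = 1 << RunningBits`, `Private->LastCode = LastCode = NO_SUCH_CODE` (three
checked loads, four checked stores of pv's fields, the slot `[rsp+14H]`): `LZOK` again; the measure untouched; to the head. -/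
def Seg6 (Lay : Layout) (μ : Microarch) (u₀ : State) : Prop :=
  ∀ (H : Heap) (rest : List Obj) (frames : List (Nat × FrameLayout)) (F : Forest) (R : Rd) (n m : Nat) (e : State) (ret : Word)
    (v : State),
    Mid Gif.L.DGifDecompressLine.at_106c87 m H rest frames F R n u₀ e ret v →
    ReachVia Lay μ WayInv v (fun w => ∃ m', m' < m ∧ Head m' H rest frames F R n u₀ e ret w)

/-- **Segment 7** (DL.T, l.923-933; 106D06H … 106D47H; 16 instructions): the checked load `Prefix[CrntCode]` (`CrntCode ≤ 4095`);
defined: `CrntPrefix = CrntCode`, `i` and `Private` spilled, `r15d = ClearCode`: the head of the trace loop with `StackPtr = 0`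
(`k = 4095`); undefined: the checked load of RunningCode, `CrntCode == RunningCode − 2`: 106DA7H, else 106D47H. -/
def Seg7 (Lay : Layout) (μ : Microarch) (u₀ : State) : Prop :=
  ∀ (H : Heap) (rest : List Obj) (frames : List (Nat × FrameLayout)) (F : Forest) (R : Rd) (n m : Nat) (e : State) (ret : Word)
    (v : State),
    Traced m H rest frames F R n u₀ e ret v →
    ReachVia Lay μ WayInv v (fun w =>
      (∃ k, Trace Gif.L.DGifDecompressLine.at_106e4b m k H rest frames F R n u₀ e ret w) ∨
      Mid Gif.L.DGifDecompressLine.at_106da7 m H rest frames F R n u₀ e ret w ∨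
      Mid Gif.L.DGifDecompressLine.at_106d47 m H rest frames F R n u₀ e ret w)

/-- **Segment 8** (DL.T′, l.934-938; 106DA7H … 106E05H; 24 instructions): `DGifGetPrefixChar(Prefix, LastCode, ClearCode)` (total in
its second argument; the third is not negative), the checked stores `Stack[0] =` (`StackPtr = 0`) and `Suffix[RunningCode − 2] =`
(`2 ≤ RunningCode ≤ 4097` by [LZ3]: an element of `Suffix[4096]`) of its low byte; `StackPtr = 1`, `CrntPrefix = LastCode`, `i` and
`Private` spilled, `r15d = ClearCode`: the head of the trace loop (`k = 4094`). -/
def Seg8 (Lay : Layout) (μ : Microarch) (u₀ : State) : Prop :=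
  ∀ (H : Heap) (rest : List Obj) (frames : List (Nat × FrameLayout)) (F : Forest) (R : Rd) (n m : Nat) (e : State) (ret : Word)
    (v : State),
    Mid Gif.L.DGifDecompressLine.at_106da7 m H rest frames F R n u₀ e ret v →
    ReachVia Lay μ WayInv v (fun w => ∃ k, Trace Gif.L.DGifDecompressLine.at_106e4b m k H rest frames F R n u₀ e ret w)

/-- **Segment 9** (DL.T′, l.940-944: the arm that accepts an undefined code, F-4; 106D47H … 106DA7H; 24 instructions): as Segment 8
with `DGifGetPrefixChar(Prefix, CrntCode, ClearCode)` (`esi = r12d`, any value). The exit assertion is Segment 8's. -/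
def Seg9 (Lay : Layout) (μ : Microarch) (u₀ : State) : Prop :=
  ∀ (H : Heap) (rest : List Obj) (frames : List (Nat × FrameLayout)) (F : Forest) (R : Rd) (n m : Nat) (e : State) (ret : Word)
    (v : State),
    Mid Gif.L.DGifDecompressLine.at_106d47 m H rest frames F R n u₀ e ret v →
    ReachVia Lay μ WayInv v (fun w => ∃ k, Trace Gif.L.DGifDecompressLine.at_106e4b m k H rest frames F R n u₀ e ret w)

/-- **Segment 10** (DL.R, l.955-960; 106E4BH … 106E67H and 106E05H … 106E4BH; 26 instructions): ONE ROUND OF THE TRACE LOOP. The test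
`StackPtr ≤ 4094 ∧ CrntPrefix > ClearCode ∧ CrntPrefix ≤ 4095` (signed; `ClearCode ≥ 0`: `1 ≤ CrntPrefix ≤ 4095`); true: the
checked load `Suffix[CrntPrefix]`, the checked store `Stack[StackPtr++] =` (index ≤ 4094: inside `Stack[4095]`; F-3: 4094 IS
reached), the checked load `CrntPrefix = Prefix[CrntPrefix]`: the head again with `k − 1`; false: 106E67H. -/
def Seg10 (Lay : Layout) (μ : Microarch) (u₀ : State) : Prop :=
  ∀ (H : Heap) (rest : List Obj) (frames : List (Nat × FrameLayout)) (F : Forest) (R : Rd) (n m k : Nat) (e : State) (ret : Word)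
    (v : State),
    Trace Gif.L.DGifDecompressLine.at_106e4b m k H rest frames F R n u₀ e ret v →
    ReachVia Lay μ WayInv v (fun w =>
      (∃ k', k' < k ∧ Trace Gif.L.DGifDecompressLine.at_106e4b m k' H rest frames F R n u₀ e ret w) ∨
      (∃ k', Trace Gif.L.DGifDecompressLine.at_106e67 m k' H rest frames F R n u₀ e ret w))

/-- **Segment 11** (DL.G, l.961-967; 106E67H … 106EDEH; 28 instructions): `i`, `Private` back from their spill slots;
`StackPtr ≥ 4095 ∨ CrntPrefix > 4095`: the checked store of `GifFile->Error`, `eax = 0`, to the epilogue; else the checked store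
`Stack[StackPtr++] = CrntPrefix` (`StackPtr ≤ 4094`: inside `Stack[4095]`), Private / Prefix spilled, `r15 = Line`,
`r14d = LineLen`: the head of the second pop loop with `StackPtr ≤ 4095`. -/
def Seg11 (Lay : Layout) (μ : Microarch) (u₀ : State) : Prop :=
  ∀ (H : Heap) (rest : List Obj) (frames : List (Nat × FrameLayout)) (F : Forest) (R : Rd) (n m k : Nat) (e : State) (ret : Word)
    (v : State),
    Trace Gif.L.DGifDecompressLine.at_106e67 m k H rest frames F R n u₀ e ret v →
    ReachVia Lay μ WayInv v (fun w =>
      Done H rest frames F R n u₀ e ret w ∨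
      Pop Gif.L.DGifDecompressLine.at_106f12 m H rest frames F R n u₀ e ret w)

/-- **Segment 12** (DL.G, l.970-972; 106EDEH … 106F43H; 28 instructions): THE SECOND POP LOOP (as Segment 2's; measure: StackPtr),
then `r14`, `r13` restored: behind the arms, W1. -/
def Seg12 (Lay : Layout) (μ : Microarch) (u₀ : State) : Prop :=
  ∀ (H : Heap) (rest : List Obj) (frames : List (Nat × FrameLayout)) (F : Forest) (R : Rd) (n m : Nat) (e : State) (ret : Word)
    (v : State),
    Pop Gif.L.DGifDecompressLine.at_106f12 m H rest frames F R n u₀ e ret v →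
    ReachVia Lay μ WayInv v (Upd Gif.L.DGifDecompressLine.at_106fea m H rest frames F R n u₀ e ret)

/-- **Segment 13** (DL.U, l.974-979 and l.995; 106FEAH … 107045H and 106F75H … 106F7DH; 22 instructions): `LastCode != NO_SUCH_CODE`,
the checked load of RunningCode, `RunningCode ≤ 4097`, the checked load `Prefix[RunningCode − 2]` (`2 ≤ RunningCode` by [LZ3]:
an element of `Prefix[4096]`) `== NO_SUCH_CODE`; one test false: `LastCode = CrntCode`, to the head. All true:
`Prefix[RunningCode − 2] = LastCode` (any value), `r15d = RunningCode`, `esi = CrntCode`; `CrntCode == RunningCode − 2`: 106F43H,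
else 107045H. -/
def Seg13 (Lay : Layout) (μ : Microarch) (u₀ : State) : Prop :=
  ∀ (H : Heap) (rest : List Obj) (frames : List (Nat × FrameLayout)) (F : Forest) (R : Rd) (n m : Nat) (e : State) (ret : Word)
    (v : State),
    Upd Gif.L.DGifDecompressLine.at_106fea m H rest frames F R n u₀ e ret v →
    ReachVia Lay μ WayInv v (fun w =>
      (∃ m', m' < m ∧ Head m' H rest frames F R n u₀ e ret w) ∨
      UpdRC Gif.L.DGifDecompressLine.at_106f43 m H rest frames F R n u₀ e ret w ∨
      UpdRC Gif.L.DGifDecompressLine.at_107045 m H rest frames F R n u₀ e ret w)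

/-- **Segment 14** (DL.U′, l.986-988 and l.995; 106F43H … 106F7DH; 14 instructions): `DGifGetPrefixChar(Prefix, LastCode, ClearCode)`,
its result through the slot `[rsp+14H]`, the checked store `Suffix[RunningCode − 2] =` (`r15d`) of its low byte;
`LastCode = CrntCode`; to the head. -/
def Seg14 (Lay : Layout) (μ : Microarch) (u₀ : State) : Prop :=
  ∀ (H : Heap) (rest : List Obj) (frames : List (Nat × FrameLayout)) (F : Forest) (R : Rd) (n m : Nat) (e : State) (ret : Word)
    (v : State),
    UpdRC Gif.L.DGifDecompressLine.at_106f43 m H rest frames F R n u₀ e ret v →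
    ReachVia Lay μ WayInv v (fun w => ∃ m', m' < m ∧ Head m' H rest frames F R n u₀ e ret w)

/-- **Segment 15** (DL.U′, l.990-992 and l.995; 107045H … 107071H and 106F75H … 106F7DH; 13 instructions):
`DGifGetPrefixChar(Prefix, CrntCode, ClearCode)` (`esi` as it is), the checked store `Suffix[RunningCode − 2] =`;
`LastCode = CrntCode`; to the head. -/
def Seg15 (Lay : Layout) (μ : Microarch) (u₀ : State) : Prop :=
  ∀ (H : Heap) (rest : List Obj) (frames : List (Nat × FrameLayout)) (F : Forest) (R : Rd) (n m : Nat) (e : State) (ret : Word)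
    (v : State),
    UpdRC Gif.L.DGifDecompressLine.at_107045 m H rest frames F R n u₀ e ret v →
    ReachVia Lay μ WayInv v (fun w => ∃ m', m' < m ∧ Head m' H rest frames F R n u₀ e ret w)

/-- **Segment E** (the epilogue, 10709DH … 1070BAH, 9 instructions): the 8-byte store that clears the frame's shadow,
`add rsp, 98H`, six pops, `ret`. -/
def SegE (Lay : Layout) (μ : Microarch) (u₀ : State) : Prop :=
  ∀ (H : Heap) (rest : List Obj) (frames : List (Nat × FrameLayout)) (F : Forest) (R : Rd) (n : Nat) (e : State) (ret : Word)
    (v : State),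
    Done H rest frames F R n u₀ e ret v →
    ReachVia Lay μ WayInv v (Returned (conv u₀) (DGifDecompressLine.spec H rest frames F R n) e ret)

/-! ### The composition -/

/-- **The composition of `DGifDecompressLine`**: the seventeen segments chain into the function's contract. The main loop: a strong
induction on the measure `m` of its head (Segment 3 lowers it; every path of the body comes back to the head with a smaller one,
or leaves through the epilogue). Inside one round: the trace loop by a strong induction on `k = 4095 − StackPtr`. -/
theorem compose {Lay : Layout} {μ : Microarch} {u₀ : State} (hP : SegP Lay μ u₀) (h1 : Seg1 Lay μ u₀) (h2 : Seg2 Lay μ u₀)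
    (h3 : Seg3 Lay μ u₀) (h4 : Seg4 Lay μ u₀) (h5 : Seg5 Lay μ u₀) (h6 : Seg6 Lay μ u₀) (h7 : Seg7 Lay μ u₀)
    (h8 : Seg8 Lay μ u₀) (h9 : Seg9 Lay μ u₀) (h10 : Seg10 Lay μ u₀) (h11 : Seg11 Lay μ u₀) (h12 : Seg12 Lay μ u₀)
    (h13 : Seg13 Lay μ u₀) (h14 : Seg14 Lay μ u₀) (h15 : Seg15 Lay μ u₀) (hE : SegE Lay μ u₀) :
    ∀ (H : Heap) (rest : List Obj) (frames : List (Nat × FrameLayout)) (F : Forest) (R : Rd) (n : Nat),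
      Calls Lay μ WayInv (conv u₀) Gif.L.DGifDecompressLine.entry (DGifDecompressLine.spec H rest frames F R n) := by
  intro H rest frames F R n e ret he hp
  -- the epilogue
  have fromDone : ∀ v, Done H rest frames F R n u₀ e ret v →
      ReachVia Lay μ WayInv v (Returned (conv u₀) (DGifDecompressLine.spec H rest frames F R n) e ret) := by
    intro v hv
    exact hE H rest frames F R n e ret v hv
  -- THE MAIN LOOP: from its head with the measure `m`
  have fromHead : ∀ m v, Head m H rest frames F R n u₀ e ret v →
      ReachVia Lay μ WayInv v (Returned (conv u₀) (DGifDecompressLine.spec H rest frames F R n) e ret) := by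
    intro m
    induction m using Nat.strongRecOn with
    | _ m ih =>
      intro v hv
      -- back to the head with a smaller measure
      have toHead : ∀ w, (∃ m', m' < m ∧ Head m' H rest frames F R n u₀ e ret w) →
          ReachVia Lay μ WayInv w (Returned (conv u₀) (DGifDecompressLine.spec H rest frames F R n) e ret) := by
        intro w hw
        obtain ⟨m', hlt, hh⟩ := hw
        exact ih m' hlt w hh
      -- DL.U, DL.U′: behind the arms
      have fromUpd : ∀ w, Upd Gif.L.DGifDecompressLine.at_106fea m H rest frames F R n u₀ e ret w →
          ReachVia Lay μ WayInv w (Returned (conv u₀) (DGifDecompressLine.spec H rest frames F R n) e ret) := by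
        intro w hw
        refine (h13 H rest frames F R n m e ret w hw).trans ?_
        intro x hx
        rcases hx with hx | hx | hx
        · exact toHead x hx
        · refine (h14 H rest frames F R n m e ret x hx).trans ?_
          intro y hy
          exact toHead y hy
        · refine (h15 H rest frames F R n m e ret x hx).trans ?_
          intro y hy
          exact toHead y hy
      -- the second pop loop
      have fromPop : ∀ w, Pop Gif.L.DGifDecompressLine.at_106f12 m H rest frames F R n u₀ e ret w →
          ReachVia Lay μ WayInv w (Returned (conv u₀) (DGifDecompressLine.spec H rest frames F R n) e ret) := by
        intro w hw
        refine (h12 H rest frames F R n m e ret w hw).trans ?_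
        intro x hx
        exact fromUpd x hx
      -- DL.G: behind the trace loop
      have fromTraced : ∀ k w, Trace Gif.L.DGifDecompressLine.at_106e67 m k H rest frames F R n u₀ e ret w →
          ReachVia Lay μ WayInv w (Returned (conv u₀) (DGifDecompressLine.spec H rest frames F R n) e ret) := by
        intro k w hw
        refine (h11 H rest frames F R n m k e ret w hw).trans ?_
        intro x hx
        rcases hx with hx | hx
        · exact fromDone x hx
        · exact fromPop x hx
      -- DL.R: THE TRACE LOOP, from its head with `4095 − StackPtr = k`
      have fromTrace : ∀ k w, Trace Gif.L.DGifDecompressLine.at_106e4b m k H rest frames F R n u₀ e ret w →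
          ReachVia Lay μ WayInv w (Returned (conv u₀) (DGifDecompressLine.spec H rest frames F R n) e ret) := by
        intro k
        induction k using Nat.strongRecOn with
        | _ k ihk =>
          intro w hw
          refine (h10 H rest frames F R n m k e ret w hw).trans ?_
          intro x hx
          rcases hx with hx | hx
          · obtain ⟨k', hlt, hx'⟩ := hx
            exact ihk k' hlt x hx'
          · obtain ⟨k', hx'⟩ := hx
            exact fromTraced k' x hx'
      have fromTrace' : ∀ w, (∃ k, Trace Gif.L.DGifDecompressLine.at_106e4b m k H rest frames F R n u₀ e ret w) →
          ReachVia Lay μ WayInv w (Returned (conv u₀) (DGifDecompressLine.spec H rest frames F R n) e ret) := by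
        intro w hw
        obtain ⟨k, hk⟩ := hw
        exact fromTrace k w hk
      -- DL.T, DL.T′: the trace arm
      have fromCode : ∀ w, Traced m H rest frames F R n u₀ e ret w →
          ReachVia Lay μ WayInv w (Returned (conv u₀) (DGifDecompressLine.spec H rest frames F R n) e ret) := by
        intro w hw
        refine (h7 H rest frames F R n m e ret w hw).trans ?_
        intro x hx
        rcases hx with hx | hx | hx
        · exact fromTrace' x hx
        · refine (h8 H rest frames F R n m e ret x hx).trans ?_
          intro y hy
          exact fromTrace' y hy
        · refine (h9 H rest frames F R n m e ret x hx).trans ?_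
          intro y hy
          exact fromTrace' y hy
      -- DL.C: the clear arm
      have fromClear : ∀ w, Mid Gif.L.DGifDecompressLine.at_106cfb m H rest frames F R n u₀ e ret w →
          ReachVia Lay μ WayInv w (Returned (conv u₀) (DGifDecompressLine.spec H rest frames F R n) e ret) := by
        intro w hw
        refine (h5 H rest frames F R n m e ret w hw).trans ?_
        intro x hx
        refine (h6 H rest frames F R n m e ret x hx).trans ?_
        intro y hy
        exact toHead y hy
      -- DL.H, DL.D: the head, the call, the dispatch
      refine (h3 H rest frames F R n m e ret v hv).trans ?_
      intro w hw
      rcases hw with hw | hw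
      · refine (h4 H rest frames F R n m e ret w hw).trans ?_
        intro x hx
        rcases hx with hx | hx | hx | hx
        · exact fromDone x hx
        · exact fromClear x hx
        · exact fromCode x hx
        · exact fromUpd x hx
      · exact fromDone w hw
  -- the prologue, the loads, the first pop loop
  refine (hP H rest frames F R n e ret he hp).trans ?_
  intro v hv
  refine (h1 H rest frames F R n e ret v hv).trans ?_
  intro w hw
  rcases hw with hw | hw | hw
  · obtain ⟨m, hpop⟩ := hw
    refine (h2 H rest frames F R n m e ret w hpop).trans ?_
    intro x hx
    obtain ⟨m', hh⟩ := hx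
    exact fromHead m' x hh
  · obtain ⟨m, hh⟩ := hw
    exact fromHead m w hh
  · exact fromDone w hw

end DGifDecompressLine

end Gif.Spec
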